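-- pv_equiv track=rewrite | github.com/HarvardPaleomag/QDMlab | admin_tools/arguments.py | detect_indent
-- ===== SOURCE A (Python) =====
-- def detect_indent(l):
--     """
--     INTERNAL
--     """
--     out = ''
--     for i,c in enumerate(l):
--         if c in [' ', '\t']:
--             out += c
--         else:
--             break
--     return out
-- ===== SOURCE B (Python) =====
-- def detect_indent(l):
--     stripped = l.lstrip(' \t')
--     return l[:len(l) - len(stripped)]
-- ===== Notes on version B (the rewrite author's own statement) =====
-- stated objective: idiomatic
-- what changed: Replaces the explicit character-by-character accumulation loop with an lstrip of spaces and tabs followed by slicing off the removed prefix length, so B performs no explicit loop.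
import Mathlib
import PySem

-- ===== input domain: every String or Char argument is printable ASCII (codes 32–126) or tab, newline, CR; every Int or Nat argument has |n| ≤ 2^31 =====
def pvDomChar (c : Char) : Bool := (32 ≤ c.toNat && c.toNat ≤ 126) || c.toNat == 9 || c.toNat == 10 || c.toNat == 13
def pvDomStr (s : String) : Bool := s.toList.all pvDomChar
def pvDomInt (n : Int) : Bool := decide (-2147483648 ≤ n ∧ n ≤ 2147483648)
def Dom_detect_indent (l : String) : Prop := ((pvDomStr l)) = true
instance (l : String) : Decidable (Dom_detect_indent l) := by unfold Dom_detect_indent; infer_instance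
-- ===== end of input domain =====

-- B replaces A's explicit accumulation loop by lstrip(' \t') plus a prefix slice (idiomatic, no explicit loop).

-- ===== PORT A =====
-- the for-loop with break, as structural recursion over the characters with the 'out' accumulator
def detect_indent_go (out : String) : List Char → String
  | [] => out
  | c :: rest => if c = ' ' ∨ c = '\t' then detect_indent_go (out.push c) rest else out

def detect_indent (l : String) : String := detect_indent_go "" l.toList

-- ===== PORT B =====
-- hand port of l.lstrip(' \t') (PySem has no chars-argument lstrip): drop leading chars from the set; exact
def lstrip_space_tab (s : List Char) : List Char := s.dropWhile (fun c => c == ' ' || c == '\t')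

def detect_indent_alt (l : String) : String :=
  let stripped := lstrip_space_tab l.toList
  String.ofList (PySem.List.slice l.toList none (some ((l.toList.length : Int) - (stripped.length : Int))))

-- ===== PRECONDITION & SPEC =====
def Spec_detect_indent (l : String) (out : String) : Prop := out = detect_indent_alt l
instance (l : String) (out : String) : Decidable (Spec_detect_indent l out) := by unfold Spec_detect_indent; infer_instance

-- ===== CLAIM =====
def Claim_equal_detect_indent : Prop := ∀ (l : String), Dom_detect_indent l → Spec_detect_indent l (detect_indent l)

-- ===== LEMMAS AND PROOFS =====
theorem detect_indent_go_eq (out : String) (cs : List Char) :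
    (detect_indent_go out cs).toList = out.toList ++ cs.takeWhile (fun c => c == ' ' || c == '\t') := by
  induction cs generalizing out with
  | nil => simp [detect_indent_go]
  | cons c rest ih =>
      by_cases h : c = ' ' ∨ c = '\t'
      · have hb : (c == ' ' || c == '\t') = true := by
          rcases h with h | h <;> simp [h]
        simp [detect_indent_go, h, ih, hb, String.toList_push, List.takeWhile_cons]
      · have hb : (c == ' ' || c == '\t') = false := by
          simp only [Bool.or_eq_false_iff, beq_eq_false_iff_ne]
          exact ⟨fun h1 => h (Or.inl h1), fun h2 => h (Or.inr h2)⟩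
        simp [detect_indent_go, h, hb, List.takeWhile_cons]

theorem detect_indent_alt_eq (l : String) :
    detect_indent_alt l = String.ofList (l.toList.takeWhile (fun c => c == ' ' || c == '\t')) := by
  unfold detect_indent_alt lstrip_space_tab
  have hlen : l.toList.length - (l.toList.dropWhile (fun c => c == ' ' || c == '\t')).length
      = (l.toList.takeWhile (fun c => c == ' ' || c == '\t')).length := by
    have h1 := congrArg List.length
      (List.takeWhile_append_dropWhile (p := fun c => c == ' ' || c == '\t') (l := l.toList))
    simp only [List.length_append] at h1
    omega
  have hcast : ((l.toList.length : Int) - ((l.toList.dropWhile (fun c => c == ' ' || c == '\t')).length : Int))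
      = ((l.toList.takeWhile (fun c => c == ' ' || c == '\t')).length : Int) := by
    have hle : (l.toList.dropWhile (fun c => c == ' ' || c == '\t')).length ≤ l.toList.length :=
      List.length_dropWhile_le _ _
    omega
  simp only [hcast, PySem.List.slice_to_natCast]
  congr 1
  exact (List.prefix_iff_eq_take.mp (List.takeWhile_prefix _)).symm

-- ===== VERDICT =====
theorem detect_indent_spec : Claim_equal_detect_indent := by
  intro l _
  unfold Spec_detect_indent
  have h := detect_indent_go_eq "" l.toList
  apply String.toList_inj.mp
  rw [detect_indent_alt_eq]
  simpa [detect_indent] using h
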